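-- pv_equiv track=rewrite | github.com/TahaShaikh018/AirBlocks | phase6_1_final_selection.py | rect_outline_cells
-- ===== SOURCE A (Python) =====
-- def rect_outline_cells(a, b):
--     x1, y1 = a
--     x2, y2 = b
--     cells = set()
--     for x in range(min(x1, x2), max(x1, x2) + 1):
--         cells.add((x, y1))
--         cells.add((x, y2))
--     for y in range(min(y1, y2), max(y1, y2) + 1):
--         cells.add((x1, y))
--         cells.add((x2, y))
--     return cells
-- ===== SOURCE B (Python) =====
-- def rect_outline_cells(a, b):
--     x1, y1 = a
--     x2, y2 = b
--     w = abs(x1 - x2) + 1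
--     h = abs(y1 - y2) + 1
--     lox, loy = min(x1, x2), min(y1, y2)
--
--     def cell(t):
--         q, r = divmod(t, 2)
--         if q < w:
--             return (lox + q, y1 if r == 0 else y2)
--         return (x1 if r == 0 else x2, loy + q - w)
--
--     return {cell(t) for t in range(2 * (w + h))}
-- ===== Notes on version B (the rewrite author's own statement) =====
-- stated objective: alternative
-- what changed: B enumerates the 2*(w+h) perimeter slots with a single flat loop and decodes each slot index t by divmod arithmetic into its cell (row band vs column band, even/odd picks the side), instead of A's two coordinate-range loops that each stamp two opposite edge cells per iteration.
import Mathlib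
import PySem

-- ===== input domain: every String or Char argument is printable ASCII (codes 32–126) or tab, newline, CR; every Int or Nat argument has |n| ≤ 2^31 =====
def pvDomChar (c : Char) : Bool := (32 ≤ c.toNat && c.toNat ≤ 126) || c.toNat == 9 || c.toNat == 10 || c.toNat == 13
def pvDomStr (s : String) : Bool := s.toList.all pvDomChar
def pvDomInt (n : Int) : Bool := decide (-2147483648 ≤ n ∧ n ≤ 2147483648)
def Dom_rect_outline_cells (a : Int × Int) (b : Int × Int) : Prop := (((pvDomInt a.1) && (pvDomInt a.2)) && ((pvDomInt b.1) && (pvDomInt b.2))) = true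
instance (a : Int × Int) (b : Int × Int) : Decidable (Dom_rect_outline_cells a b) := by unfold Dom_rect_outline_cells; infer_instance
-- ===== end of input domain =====

-- B enumerates the 2*(w+h) perimeter slots with ONE flat loop and decodes each slot index t by
-- divmod arithmetic into its cell, instead of A's two per-axis loops each stamping two edge cells;
-- same O(w+h) cost, a different decomposition. Both functions return a Python set, whose iteration order
-- is not modelled; both ports therefore return the set's elements in a canonical sorted order.


-- canonical linear key on cells, used only to fix the output order of the returned set
def pvKey (p : Int × Int) : Int := p.1 * 8589934592 + p.2

-- ===== PORT A =====
-- A's set, built exactly as A builds it: two loops, each adding two cells per step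
def pvCellsA (a : Int × Int) (b : Int × Int) : PySem.Set (Int × Int) :=
  let s1 := (PySem.List.pyRange (min a.1 b.1) (max a.1 b.1 + 1) 1).foldl
      (fun s x => PySem.Set.add (PySem.Set.add s (x, a.2)) (x, b.2)) PySem.Set.empty
  (PySem.List.pyRange (min a.2 b.2) (max a.2 b.2 + 1) 1).foldl
      (fun s y => PySem.Set.add (PySem.Set.add s (a.1, y)) (b.1, y)) s1

def rect_outline_cells (a : Int × Int) (b : Int × Int) : List (Int × Int) :=
  PySem.List.sorted (pvCellsA a b) pvKey false

-- ===== PORT B =====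
-- B's cell for perimeter-slot index t: divmod decodes t into (pair index q, side r)
def pvCell (a : Int × Int) (b : Int × Int) (t : Int) : Int × Int :=
  if PySem.Int.floordiv t 2 < ((a.1 - b.1).natAbs : Int) + 1 then
    (min a.1 b.1 + PySem.Int.floordiv t 2, if PySem.Int.mod t 2 = 0 then a.2 else b.2)
  else
    ((if PySem.Int.mod t 2 = 0 then a.1 else b.1),
      min a.2 b.2 + PySem.Int.floordiv t 2 - (((a.1 - b.1).natAbs : Int) + 1))

-- B's set: one flat enumeration of the 2*(w+h) perimeter slots, decoded by pvCell
def pvCellsB (a : Int × Int) (b : Int × Int) : PySem.Set (Int × Int) :=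
  PySem.Set.ofList
    ((PySem.List.pyRange 0
        (2 * ((((a.1 - b.1).natAbs : Int) + 1) + (((a.2 - b.2).natAbs : Int) + 1))) 1).map
      (pvCell a b))

def rect_outline_cells_alt (a : Int × Int) (b : Int × Int) : List (Int × Int) :=
  PySem.List.sorted (pvCellsB a b) pvKey false

-- ===== PRECONDITION & SPEC =====
def Spec_rect_outline_cells (a : Int × Int) (b : Int × Int) (out : List (Int × Int)) : Prop := out = rect_outline_cells_alt a b
instance (a : Int × Int) (b : Int × Int) (out : List (Int × Int)) : Decidable (Spec_rect_outline_cells a b out) := by unfold Spec_rect_outline_cells; infer_instance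

-- ===== CLAIM (what is proved, stated in full; the proofs are below) =====
def Claim_equal_rect_outline_cells : Prop := ∀ (a : Int × Int) (b : Int × Int), Dom_rect_outline_cells a b → Spec_rect_outline_cells a b (rect_outline_cells a b)

-- ===== LEMMAS AND PROOFS =====

lemma pv_mem_foldl_add2 (f g : Int → Int × Int) (l : List Int) (s0 : PySem.Set (Int × Int)) (p : Int × Int) :
    p ∈ l.foldl (fun s x => PySem.Set.add (PySem.Set.add s (f x)) (g x)) s0 ↔
      p ∈ s0 ∨ ∃ x ∈ l, p = f x ∨ p = g x := by
  induction l generalizing s0 with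
  | nil => simp
  | cons h t ih => simp [ih, PySem.Set.mem_add, or_assoc]

lemma pv_nodup_foldl_add2 (f g : Int → Int × Int) (l : List Int) (s0 : PySem.Set (Int × Int))
    (h : s0.Nodup) :
    (l.foldl (fun s x => PySem.Set.add (PySem.Set.add s (f x)) (g x)) s0).Nodup := by
  induction l generalizing s0 with
  | nil => exact h
  | cons x t ih => exact ih _ (PySem.Set.nodup_add _ _ (PySem.Set.nodup_add _ _ h))

lemma pv_mem_cellsA (a b : Int × Int) (p : Int × Int) :
    p ∈ pvCellsA a b ↔
      ((min a.1 b.1 ≤ p.1 ∧ p.1 ≤ max a.1 b.1) ∧ (p.2 = a.2 ∨ p.2 = b.2)) ∨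
      ((min a.2 b.2 ≤ p.2 ∧ p.2 ≤ max a.2 b.2) ∧ (p.1 = a.1 ∨ p.1 = b.1)) := by
  unfold pvCellsA
  rw [pv_mem_foldl_add2, pv_mem_foldl_add2]
  simp only [PySem.Set.empty, List.not_mem_nil, false_or, PySem.List.mem_pyRange_one,
    Prod.ext_iff]
  constructor
  · rintro ((⟨x, hx, (⟨h1, h2⟩ | ⟨h1, h2⟩)⟩) | ⟨y, hy, (⟨h1, h2⟩ | ⟨h1, h2⟩)⟩) <;> omega
  · rintro (⟨⟨hl, hr⟩, (h | h)⟩ | ⟨⟨hl, hr⟩, (h | h)⟩)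
    · exact Or.inl ⟨p.1, by omega, Or.inl ⟨rfl, h⟩⟩
    · exact Or.inl ⟨p.1, by omega, Or.inr ⟨rfl, h⟩⟩
    · exact Or.inr ⟨p.2, by omega, Or.inl ⟨h, rfl⟩⟩
    · exact Or.inr ⟨p.2, by omega, Or.inr ⟨h, rfl⟩⟩

lemma pv_nodup_cellsA (a b : Int × Int) : (pvCellsA a b).Nodup := by
  unfold pvCellsA
  exact pv_nodup_foldl_add2 _ _ _ _ (pv_nodup_foldl_add2 _ _ _ _ (by simp [PySem.Set.empty]))

lemma pv_nodup_cellsB (a b : Int × Int) : (pvCellsB a b).Nodup := by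
  unfold pvCellsB
  exact PySem.Set.nodup_ofList _

lemma pv_mem_cellsB (a b : Int × Int) (p : Int × Int) :
    p ∈ pvCellsB a b ↔
      ((min a.1 b.1 ≤ p.1 ∧ p.1 ≤ max a.1 b.1) ∧ (p.2 = a.2 ∨ p.2 = b.2)) ∨
      ((min a.2 b.2 ≤ p.2 ∧ p.2 ≤ max a.2 b.2) ∧ (p.1 = a.1 ∨ p.1 = b.1)) := by
  unfold pvCellsB
  simp only [PySem.Set.mem_ofList, List.mem_map, PySem.List.mem_pyRange_one]
  constructor
  · rintro ⟨t, ⟨ht0, ht1⟩, rfl⟩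
    unfold pvCell
    rw [PySem.Int.floordiv_eq_ediv_of_pos (by omega),
      PySem.Int.mod_eq_emod_of_pos (by omega)]
    split_ifs with h1 h2 h3 <;> dsimp only <;> omega
  · intro h
    rcases h with ⟨⟨hl, hr⟩, hy | hy⟩ | ⟨⟨hl, hr⟩, hx | hx⟩
    · -- row cell with y = a.2: slot t = 2*(p.1 - lox)
      refine ⟨2 * (p.1 - min a.1 b.1), by omega, ?_⟩
      unfold pvCell
      rw [PySem.Int.floordiv_eq_ediv_of_pos (by omega),
        PySem.Int.mod_eq_emod_of_pos (by omega)]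
      rw [if_pos (by omega), if_pos (by omega)]
      exact Prod.ext (by omega) hy.symm
    · -- row cell with y = b.2: slot t = 2*(p.1 - lox) + 1
      refine ⟨2 * (p.1 - min a.1 b.1) + 1, by omega, ?_⟩
      unfold pvCell
      rw [PySem.Int.floordiv_eq_ediv_of_pos (by omega),
        PySem.Int.mod_eq_emod_of_pos (by omega)]
      rw [if_pos (by omega), if_neg (by omega)]
      exact Prod.ext (by omega) hy.symm
    · -- column cell with x = a.1: slot t = 2*(w + (p.2 - loy))
      refine ⟨2 * ((((a.1 - b.1).natAbs : Int) + 1) + (p.2 - min a.2 b.2)), by omega, ?_⟩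
      unfold pvCell
      rw [PySem.Int.floordiv_eq_ediv_of_pos (by omega),
        PySem.Int.mod_eq_emod_of_pos (by omega)]
      rw [if_neg (by omega), if_pos (by omega)]
      exact Prod.ext hx.symm (by omega)
    · -- column cell with x = b.1: slot t = 2*(w + (p.2 - loy)) + 1
      refine ⟨2 * ((((a.1 - b.1).natAbs : Int) + 1) + (p.2 - min a.2 b.2)) + 1, by omega, ?_⟩
      unfold pvCell
      rw [PySem.Int.floordiv_eq_ediv_of_pos (by omega),
        PySem.Int.mod_eq_emod_of_pos (by omega)]
      rw [if_neg (by omega), if_neg (by omega)]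
      exact Prod.ext hx.symm (by omega)

-- ===== VERDICT (by name: the statement is the Claim_ definition above) =====
theorem rect_outline_cells_spec : Claim_equal_rect_outline_cells := by
  intro a b hdom
  unfold Spec_rect_outline_cells rect_outline_cells rect_outline_cells_alt
  have hndB : (pvCellsB a b).Nodup := pv_nodup_cellsB a b
  have hperm : (pvCellsB a b).Perm (pvCellsA a b) := by
    rw [List.perm_ext_iff_of_nodup hndB (pv_nodup_cellsA a b)]
    intro p
    rw [pv_mem_cellsB, pv_mem_cellsA]
  have hsp := PySem.List.sorted_perm (xs := pvCellsB a b) (key := pvKey) (rev := false)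
  have hnd : (PySem.List.sorted (pvCellsB a b) pvKey false).Nodup := hsp.nodup_iff.mpr hndB
  have hle : (PySem.List.sorted (pvCellsB a b) pvKey false).Pairwise
      (fun u v => pvKey u ≤ pvKey v) := PySem.List.sorted_pairwise _ _
  refine PySem.List.sorted_eq_of_perm_of_pairwise_lt _ _ _ (hsp.trans hperm) ?_
  refine (hle.and hnd).imp_of_mem ?_
  intro u v hu hv ⟨h1, h2⟩
  have hu' : u ∈ pvCellsB a b := (PySem.List.mem_sorted _ _ _ _).1 hu
  have hv' : v ∈ pvCellsB a b := (PySem.List.mem_sorted _ _ _ _).1 hv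
  rcases lt_or_eq_of_le h1 with h | h
  · exact h
  · exfalso
    apply h2
    rw [pv_mem_cellsB] at hu' hv'
    unfold Dom_rect_outline_cells pvDomInt at hdom
    simp only [Bool.and_eq_true, decide_eq_true_eq] at hdom
    unfold pvKey at h
    have : u.1 = v.1 ∧ u.2 = v.2 := by omega
    exact Prod.ext this.1 this.2
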